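-- pv_equiv track=rewrite | github.com/imagecircus/sudoku-solver | functions.py | check_boxes_for_unique_values
-- ===== SOURCE A (Python) =====
-- from collections import Counter
--
-- def check_boxes_for_unique_values(potential_answers):
-- 	boxes = []
-- 	box_1 = [11, 12, 13, 21, 22, 23, 31, 32, 33]
-- 	box_2 = [14, 15, 16, 24, 25, 26, 34, 35, 36]
-- 	box_3 = [17, 18, 19, 27, 28, 29, 37, 38, 39]
-- 	box_4 = [41, 42, 43, 51, 52, 53, 61, 62, 63]
-- 	box_5 = [44, 45, 46, 54, 55, 56, 64, 65, 66]
-- 	box_6 = [47, 48, 49, 57, 58, 59, 67, 68, 69]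
-- 	box_7 = [71, 72, 73, 81, 82, 83, 91, 92, 93]
-- 	box_8 = [74, 75, 76, 84, 85, 86, 94, 95, 96]
-- 	box_9 = [77, 78, 79, 87, 88, 89, 97, 98, 99]
-- 	boxes += [box_1]
-- 	boxes += [box_2]
-- 	boxes += [box_3]
-- 	boxes += [box_4]
-- 	boxes += [box_5]
-- 	boxes += [box_6]
-- 	boxes += [box_7]
-- 	boxes += [box_8]
-- 	boxes += [box_9]
-- 	i = 0
-- 	output = {}
-- 	for box in boxes:
-- 		this_box = {}
-- 		keys_to_remove = []
-- 		all_values = []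
-- 		i += 1
-- 		# Create a dictionary of all the potential answers in a box
-- 		for location in box:
-- 			if location in potential_answers:
-- 				this_box.update({location : potential_answers.get(location)})
--
-- 		# create a list of all possible answers in the box
-- 		for location, values in this_box.items():
-- 			for value in values:
-- 				all_values.append(value)
--
-- 		# check the list for values that appear only once within the box
-- 		# output a dictionary of the locations and values of unique answers
-- 		for value, count in Counter(all_values).most_common():
-- 			if count == 1:
-- 				unique_answer = ""
-- 				unique_answer = value
-- 				for location, values in this_box.items():
-- 					for value in values:
-- 						if value == unique_answer:
-- 							output.update({location : [value]})
--
-- 	return output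
-- ===== SOURCE B (Python) =====
-- def check_boxes_for_unique_values(potential_answers):
-- 	boxes = [
-- 		[11, 12, 13, 21, 22, 23, 31, 32, 33],
-- 		[14, 15, 16, 24, 25, 26, 34, 35, 36],
-- 		[17, 18, 19, 27, 28, 29, 37, 38, 39],
-- 		[41, 42, 43, 51, 52, 53, 61, 62, 63],
-- 		[44, 45, 46, 54, 55, 56, 64, 65, 66],
-- 		[47, 48, 49, 57, 58, 59, 67, 68, 69],
-- 		[71, 72, 73, 81, 82, 83, 91, 92, 93],
-- 		[74, 75, 76, 84, 85, 86, 94, 95, 96],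
-- 		[77, 78, 79, 87, 88, 89, 97, 98, 99],
-- 	]
-- 	output = {}
-- 	for box in boxes:
-- 		# one pass: index each candidate value to the box locations holding it
-- 		index = {}
-- 		for location in box:
-- 			if location in potential_answers:
-- 				for value in potential_answers[location]:
-- 					index.setdefault(value, []).append(location)
-- 		# a value indexed at exactly one occurrence is unique in the box
-- 		for value, locations in index.items():
-- 			if len(locations) == 1:
-- 				output[locations[0]] = [value]
-- 	return output
-- ===== Notes on version B (the rewrite author's own statement) =====
-- stated objective: simpler
-- what changed: B replaces A's Counter over all box values, stable most_common sort, and per-unique-value rescan of the whole box by a single pass that indexes each candidate value to the list of box locations containing it and then directly emits the locations whose value-list has length one.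
import Mathlib
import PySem

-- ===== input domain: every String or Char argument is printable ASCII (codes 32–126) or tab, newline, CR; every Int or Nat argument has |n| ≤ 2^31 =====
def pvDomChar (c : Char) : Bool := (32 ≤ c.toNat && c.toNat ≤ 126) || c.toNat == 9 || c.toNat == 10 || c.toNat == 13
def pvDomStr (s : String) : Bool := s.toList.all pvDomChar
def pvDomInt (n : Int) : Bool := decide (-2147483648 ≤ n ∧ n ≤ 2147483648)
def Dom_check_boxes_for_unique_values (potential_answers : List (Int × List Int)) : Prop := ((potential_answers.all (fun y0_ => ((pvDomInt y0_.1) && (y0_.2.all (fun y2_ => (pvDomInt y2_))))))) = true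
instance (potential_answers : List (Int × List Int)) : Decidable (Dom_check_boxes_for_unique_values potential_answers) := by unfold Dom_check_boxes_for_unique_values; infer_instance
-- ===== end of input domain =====

-- B replaces A's Counter + most_common + per-value rescan of the box by one pass that
-- indexes each candidate value to its box locations and emits the singletons directly (objective: simpler).

-- the nine fixed boxes (shared data table; used by both ports)
def pvBoxes : List (List Int) :=
  [[11, 12, 13, 21, 22, 23, 31, 32, 33],
   [14, 15, 16, 24, 25, 26, 34, 35, 36],
   [17, 18, 19, 27, 28, 29, 37, 38, 39],
   [41, 42, 43, 51, 52, 53, 61, 62, 63],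
   [44, 45, 46, 54, 55, 56, 64, 65, 66],
   [47, 48, 49, 57, 58, 59, 67, 68, 69],
   [71, 72, 73, 81, 82, 83, 91, 92, 93],
   [74, 75, 76, 84, 85, 86, 94, 95, 96],
   [77, 78, 79, 87, 88, 89, 97, 98, 99]]

-- ===== PORT A =====
-- `this_box` of one box: insert each box location present in potential_answers with its value list
def pvA_thisBox (pa : List (Int × List Int)) (box : List Int) : PySem.Dict Int (List Int) :=
  box.foldl (fun tb loc =>
    if (PySem.Dict.mk pa).contains loc then
      tb.insert loc (((PySem.Dict.mk pa).get? loc).getD [])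
    else tb) PySem.Dict.empty

-- A's innermost double loop: for each occurrence equal to the unique answer, output[location] = [value]
def pvA_emit (tb : PySem.Dict Int (List Int)) (ua : Int) (out : PySem.Dict Int (List Int)) :
    PySem.Dict Int (List Int) :=
  tb.items.foldl (fun out lv =>
    lv.2.foldl (fun out v => if v == ua then out.insert lv.1 [v] else out) out) out

-- one iteration of A's `for box in boxes` loop; Counter(...).most_common() is the stable
-- descending sort of the counter's items by count (exact CPython semantics)
def pvA_box (pa : List (Int × List Int)) (box : List Int) (out : PySem.Dict Int (List Int)) :
    PySem.Dict Int (List Int) :=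
  let tb := pvA_thisBox pa box
  let all_values := tb.items.foldl (fun acc lv => lv.2.foldl (fun acc v => acc ++ [v]) acc) []
  (PySem.List.sorted (PySem.Dict.counter all_values).items (fun p => p.2) true).foldl
    (fun out vc => if vc.2 == 1 then pvA_emit tb vc.1 out else out) out

def check_boxes_for_unique_values (potential_answers : List (Int × List Int)) : List (Int × List Int) :=
  (pvBoxes.foldl (fun out box => pvA_box potential_answers box out) PySem.Dict.empty).items

-- ===== PORT B =====
-- B's index pass: map each candidate value to the box locations holding it (setdefault(v, []).append(loc))
def pvB_index (pa : List (Int × List Int)) (box : List Int) : PySem.Dict Int (List Int) :=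
  box.foldl (fun idx loc =>
    match (PySem.Dict.mk pa).get? loc with
    | none => idx
    | some vs => vs.foldl (fun idx v => idx.modify v [] (fun ls => ls ++ [loc])) idx) PySem.Dict.empty

-- B's emit pass; locations[0] is headD (guarded by length == 1, so never the default)
def pvB_box (pa : List (Int × List Int)) (box : List Int) (out : PySem.Dict Int (List Int)) :
    PySem.Dict Int (List Int) :=
  (pvB_index pa box).items.foldl (fun out vl =>
    if vl.2.length == 1 then out.insert (vl.2.headD 0) [vl.1] else out) out

def check_boxes_for_unique_values_alt (potential_answers : List (Int × List Int)) : List (Int × List Int) :=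
  (pvBoxes.foldl (fun out box => pvB_box potential_answers box out) PySem.Dict.empty).items

-- ===== PRECONDITION & SPEC =====
def Spec_check_boxes_for_unique_values (potential_answers : List (Int × List Int)) (out : List (Int × List Int)) : Prop := out = check_boxes_for_unique_values_alt potential_answers
instance (potential_answers : List (Int × List Int)) (out : List (Int × List Int)) : Decidable (Spec_check_boxes_for_unique_values potential_answers out) := by unfold Spec_check_boxes_for_unique_values; infer_instance

-- ===== CLAIM (what is proved, stated in full; the proofs are below) =====
def Claim_equal_check_boxes_for_unique_values : Prop := ∀ (potential_answers : List (Int × List Int)), Dom_check_boxes_for_unique_values potential_answers → Spec_check_boxes_for_unique_values potential_answers (check_boxes_for_unique_values potential_answers)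

-- ===== LEMMAS AND PROOFS =====

-- the (location, values) pairs a box collects, and the flat (value, location) occurrence list
def pvPairs (pa : List (Int × List Int)) (box : List Int) : List (Int × List Int) :=
  box.filterMap (fun loc => ((PySem.Dict.mk pa).get? loc).map (fun vs => (loc, vs)))

def pvOccs (pa : List (Int × List Int)) (box : List Int) : List (Int × Int) :=
  (pvPairs pa box).flatMap (fun p => p.2.map (fun v => (v, p.1)))

lemma thisBox_items_aux (pa : List (Int × List Int)) (box : List Int)
    (tb : PySem.Dict Int (List Int)) (h1 : box.Nodup) (h2 : ∀ l ∈ box, tb.contains l = false) :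
    (box.foldl (fun tb loc =>
      if (PySem.Dict.mk pa).contains loc then
        tb.insert loc (((PySem.Dict.mk pa).get? loc).getD [])
      else tb) tb).items = tb.items ++ pvPairs pa box := by
  induction box generalizing tb with
  | nil => simp [pvPairs]
  | cons loc rest ih =>
    simp only [List.foldl_cons]
    rcases List.nodup_cons.mp h1 with ⟨hni, hnd⟩
    by_cases hc : (PySem.Dict.mk pa).contains loc = true
    · obtain ⟨vs, hvs⟩ : ∃ vs, (PySem.Dict.mk pa).get? loc = some vs := by
        rw [PySem.Dict.contains_eq_isSome_get?] at hc
        exact Option.isSome_iff_exists.mp hc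
      rw [if_pos hc, ih _ hnd ?_, PySem.Dict.items_insert_of_not_contains _ _ (h2 loc (by simp))]
      · simp [pvPairs, hvs]
      · intro l hl
        rw [PySem.Dict.contains_insert]
        simp only [Bool.or_eq_false_iff]
        exact ⟨by simp; rintro rfl; exact hni hl, h2 l (by simp [hl])⟩
    · have hn : (PySem.Dict.mk pa).get? loc = none := by
        rw [PySem.Dict.contains_eq_isSome_get?] at hc
        simpa using hc
      rw [if_neg hc, ih _ hnd (fun l hl => h2 l (List.mem_cons_of_mem _ hl))]
      simp [pvPairs, hn]

lemma thisBox_items (pa : List (Int × List Int)) (box : List Int) (h1 : box.Nodup) :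
    (pvA_thisBox pa box).items = pvPairs pa box := by
  unfold pvA_thisBox
  rw [thisBox_items_aux pa box PySem.Dict.empty h1 (by simp)]
  simp [PySem.Dict.empty]

lemma allValues_eq (pa : List (Int × List Int)) (box : List Int) (h1 : box.Nodup) :
    (pvA_thisBox pa box).items.foldl (fun acc lv => lv.2.foldl (fun acc v => acc ++ [v]) acc) []
      = (pvOccs pa box).map (·.1) := by
  rw [thisBox_items pa box h1]
  have h2 : (pvOccs pa box).map (·.1) = (pvPairs pa box).flatMap (fun p => p.2) := by
    unfold pvOccs
    rw [List.map_flatMap]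
    simp [List.map_map, Function.comp_def]
  rw [h2, ← List.foldl_flatMap, PySem.List.foldl_append_singleton]
  simp

lemma index_eq_occs_fold (pa : List (Int × List Int)) (box : List Int) :
    pvB_index pa box
      = (pvOccs pa box).foldl (fun idx q => idx.modify q.1 [] (fun ls => ls ++ [q.2]))
          PySem.Dict.empty := by
  unfold pvB_index
  have h : ∀ (idx : PySem.Dict Int (List Int)),
      box.foldl (fun idx loc =>
        match (PySem.Dict.mk pa).get? loc with
        | none => idx
        | some vs => vs.foldl (fun idx v => idx.modify v [] (fun ls => ls ++ [loc])) idx) idx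
      = (pvPairs pa box).foldl
          (fun idx p => p.2.foldl (fun idx v => idx.modify v [] (fun ls => ls ++ [p.1])) idx) idx := by
    intro idx
    induction box generalizing idx with
    | nil => simp [pvPairs]
    | cons loc rest ih =>
      cases hget : (PySem.Dict.mk pa).get? loc with
      | none => simp [pvPairs, hget, ih]
      | some vs => simp [pvPairs, hget, ih]
  rw [h]
  unfold pvOccs
  rw [List.foldl_flatMap]
  simp [List.foldl_map]

lemma emit_eq_filter_fold (pa : List (Int × List Int)) (box : List Int) (ua : Int)
    (out : PySem.Dict Int (List Int)) (h1 : box.Nodup) :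
    pvA_emit (pvA_thisBox pa box) ua out
      = ((pvOccs pa box).filter (fun q => q.1 == ua)).foldl
          (fun out q => out.insert q.2 [q.1]) out := by
  unfold pvA_emit
  rw [thisBox_items pa box h1, List.foldl_filter]
  unfold pvOccs
  rw [List.foldl_flatMap]
  simp [List.foldl_map]

lemma filter_insertBy_rev {α : Type} (key : α → Int) (c : Int) (x : α) (acc : List α)
    (hs : acc.Pairwise (fun a b => key b ≤ key a)) :
    (PySem.List.insertBy (fun a b => decide (key b < key a)) x acc).filter (fun a => key a == c)
      = if key x == c then acc.filter (fun a => key a == c) ++ [x]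
        else acc.filter (fun a => key a == c) := by
  induction acc with
  | nil =>
    simp only [PySem.List.insertBy, List.filter_nil]
    split_ifs with h <;> simp [List.filter, h]
  | cons y ys ih =>
    rcases List.pairwise_cons.mp hs with ⟨hy, hys⟩
    simp only [PySem.List.insertBy]
    by_cases hb : key y < key x
    · rw [if_pos (by simpa using hb)]
      by_cases hx : key x == c
      · have hc' : key x = c := by simpa using hx
        have hnil : (y :: ys).filter (fun a => key a == c) = [] := by
          rw [List.filter_eq_nil_iff]
          intro z hz
          have : key z < c := by
            rcases List.mem_cons.mp hz with rfl | hz'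
            · omega
            · have := hy z hz'; omega
          simp; omega
        rw [if_pos hx, List.filter_cons, hnil]
        simp [hx]
      · simp [List.filter, hx]
    · rw [if_neg (by simpa using hb)]
      by_cases hyc : key y == c
      · simp [List.filter, hyc, ih hys]
        split_ifs <;> simp
      · simp [List.filter, hyc, ih hys]

lemma filter_sorted_rev {α : Type} (key : α → Int) (c : Int) (xs : List α) :
    (PySem.List.sorted xs key true).filter (fun a => key a == c)
      = xs.filter (fun a => key a == c) := by
  induction xs using List.reverseRecOn with
  | nil => simp [PySem.List.sorted]
  | append_singleton xs x ih =>
    have h : PySem.List.sorted (xs ++ [x]) key true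
        = PySem.List.insertBy (fun a b => decide (key b < key a)) x (PySem.List.sorted xs key true) := by
      rw [PySem.List.sorted_rev_eq_foldl_insertBy, PySem.List.sorted_rev_eq_foldl_insertBy,
        List.foldl_append]
      rfl
    rw [h, filter_insertBy_rev key c x _ (PySem.List.sorted_pairwise_rev xs key), List.filter_append]
    by_cases hx : key x == c <;> simp [List.filter, hx, ih]

lemma box_step_eq (pa : List (Int × List Int)) (box : List Int) (out : PySem.Dict Int (List Int))
    (h1 : box.Nodup) : pvA_box pa box out = pvB_box pa box out := by
  simp only [pvA_box, pvB_box]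
  rw [allValues_eq pa box h1, index_eq_occs_fold pa box]
  have hA : ∀ (l : List (Int × Int)) (out : PySem.Dict Int (List Int)),
      l.foldl (fun out vc => if vc.2 == 1 then pvA_emit (pvA_thisBox pa box) vc.1 out else out) out
        = (l.filter (fun vc => vc.2 == 1)).foldl
            (fun out vc => pvA_emit (pvA_thisBox pa box) vc.1 out) out := by
    intro l out
    exact (List.foldl_filter).symm
  rw [hA, filter_sorted_rev (α := Int × Int) (fun p => p.2) 1, PySem.Dict.items_counter,
    List.filter_map, List.foldl_map]
  set occs := pvOccs pa box with hoccs
  set vals := occs.map (·.1) with hvals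
  -- B side: the index's items
  have hnodup : ((occs.foldl (fun idx q => idx.modify q.1 [] (fun ls => ls ++ [q.2]))
      PySem.Dict.empty).keys).Nodup := by
    exact PySem.Dict.nodup_keys_foldl_modify_key occs (fun q => q.1) []
      (fun d q => fun ls => ls ++ [q.2]) _ (by simp)
  rw [PySem.Dict.items_eq_map_keys _ hnodup [], PySem.Dict.keys_foldl_modify_key, List.foldl_map]
  have hkeys : PySem.Set.update (PySem.Dict.empty (κ := Int) (ν := List Int)).keys
      (occs.map (fun q => q.1)) = PySem.Set.ofList vals := by
    simp [pysem, hvals, PySem.Set.ofList, List.foldl_map]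
  rw [hkeys, List.foldl_filter]
  refine PySem.List.foldl_congr_mem _ _ _ _ ?_
  intro acc k hk
  have hgetD : (occs.foldl (fun idx q => idx.modify q.1 [] (fun ls => ls ++ [q.2]))
      PySem.Dict.empty).getD k [] = (occs.filter (fun q => q.1 == k)).map (·.2) := by
    rw [PySem.Dict.getD_foldl_modify_append]
    simp
  have hcount : vals.count k = (occs.filter (fun q => q.1 == k)).length := by
    rw [hvals, List.count, List.countP_map, List.countP_eq_length_filter]
    rfl
  rw [hgetD]
  by_cases hone : (occs.filter (fun q => q.1 == k)).length = 1
  · obtain ⟨q, hq⟩ := List.length_eq_one_iff.mp hone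
    have hqk : q.1 = k := by
      have : q ∈ occs.filter (fun q => q.1 == k) := by rw [hq]; simp
      simpa using (List.mem_filter.mp this).2
    rw [if_pos (by simp [hcount, hone]), if_pos (by simp [hq])]
    rw [emit_eq_filter_fold pa box k acc h1, ← hoccs, hq]
    simp [hqk]
  · rw [if_neg (by simp [hcount]; omega), if_neg (by simp [hone])]

theorem ports_agree (pa : List (Int × List Int)) :
    check_boxes_for_unique_values pa = check_boxes_for_unique_values_alt pa := by
  unfold check_boxes_for_unique_values check_boxes_for_unique_values_alt
  congr 1
  refine PySem.List.foldl_congr_mem _ _ _ _ ?_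
  intro acc box hbox
  exact box_step_eq pa box acc (by fin_cases hbox <;> decide)

-- ===== VERDICT (by name: the statement is the Claim_ definition above) =====
theorem check_boxes_for_unique_values_spec : Claim_equal_check_boxes_for_unique_values := by
  intro pa _
  exact ports_agree pa
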